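-- pv_equiv track=rewrite | github.com/kareemadesola/pythonDataStructures | LeetCode/daily/december_23.py | imageSmootherAlt
-- ===== SOURCE A (Python) =====
-- from typing import List, Optional
--
-- def imageSmootherAlt(img: List[List[int]]) -> List[List[int]]:
--     m, n = len(img), len(img[0])
--     for r in range(m):
--         for c in range(n):
--             total = count = 0
--             for i in range(r - 1, r + 2):
--                 for j in range(c - 1, c + 2):
--                     if 0 <= i < m and 0 <= j < n:
--                         total += img[i][j] & 255
--                         count += 1
--             img[r][c] |= (total // count) << 8
--
--     for r in range(m):
--         for c in range(n):
--             img[r][c] >>= 8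
--     return img
-- ===== SOURCE B (Python) =====
-- from typing import List, Optional
--
-- def imageSmootherAlt(img: List[List[int]]) -> List[List[int]]:
--     # In-place box smoothing of the byte image: while a cell's neighbours still
--     # need its original byte, park each result in the cell's high bits, then
--     # shift everything down in a final pass.  Per row, a prefix-sum array of the
--     # clamped row band's column sums replaces any per-cell window rescan.
--     m, n = len(img), len(img[0])
--     for r in range(m):
--         lo, hi = max(0, r - 1), min(m - 1, r + 1)
--         colsum = [0] * (n + 1)
--         for c in range(n):
--             colsum[c + 1] = colsum[c] + sum(img[i][c] & 255 for i in range(lo, hi + 1))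
--         for c in range(n):
--             c1, c2 = max(0, c - 1), min(n - 1, c + 1)
--             total = colsum[c2 + 1] - colsum[c1]
--             count = (hi - lo + 1) * (c2 - c1 + 1)
--             img[r][c] |= (total // count) << 8
--     for r in range(m):
--         for c in range(n):
--             img[r][c] >>= 8
--     return img
-- ===== Notes on version B (the rewrite author's own statement) =====
-- stated objective: alternative
-- what changed: B keeps the in-place high-bit packing but computes each row's window totals from a prefix-sum array of the clamped row band's column sums and gets the divisor from the clamped bounds in closed form, instead of A's per-cell guarded 3x3 rescan that re-reads and re-counts 9 neighbours for every cell; Pre_ excludes only the inputs where A raises IndexError (empty grid, or a row shorter than the first row).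
import Mathlib
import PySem

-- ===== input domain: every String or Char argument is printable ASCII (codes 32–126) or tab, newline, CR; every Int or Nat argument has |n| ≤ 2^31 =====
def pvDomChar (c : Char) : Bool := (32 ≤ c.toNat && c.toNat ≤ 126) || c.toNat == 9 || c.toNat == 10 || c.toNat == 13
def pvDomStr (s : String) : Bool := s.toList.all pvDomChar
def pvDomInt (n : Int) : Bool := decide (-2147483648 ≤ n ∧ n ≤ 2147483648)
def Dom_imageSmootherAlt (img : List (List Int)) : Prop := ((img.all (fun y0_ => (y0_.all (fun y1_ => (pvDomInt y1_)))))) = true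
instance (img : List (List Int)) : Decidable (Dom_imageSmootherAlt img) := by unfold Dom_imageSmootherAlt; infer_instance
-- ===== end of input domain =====

-- B keeps the in-place high-bit packing but replaces A's per-cell guarded 3x3 rescan with
-- per-row clamped window bounds, a prefix-sum array of the row band's column sums, and a
-- closed-form count; A mutates img in place and returns it, so the equivalence proved here
-- is about the return value only.

-- ===== PORT A =====
-- the 3x3 guarded window scan of A (total, count); reads img[i][j] are ported with getD: inside
-- Pre_ every guarded access is in range, so this is exact there
def aWindow (h : List (List Int)) (m n : Nat) (r c : Nat) : Int × Int :=
  (PySem.List.pyRange ((r:Int) - 1) ((r:Int) + 2) 1).foldl (fun tc i =>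
    (PySem.List.pyRange ((c:Int) - 1) ((c:Int) + 2) 1).foldl (fun tc j =>
      if 0 ≤ i ∧ i < (m:Int) ∧ 0 ≤ j ∧ j < (n:Int) then
        (tc.1 + PySem.Int.band ((h.getD i.toNat []).getD j.toNat 0) 255, tc.2 + 1)
      else tc) tc) (((0:Int), (0:Int)))

def imageSmootherAlt (img : List (List Int)) : List (List Int) :=
  let m := img.length
  let n := (img.headD []).length
  let g1 := (List.range m).foldl (fun g (r : Nat) =>
    (List.range n).foldl (fun g (c : Nat) =>
      let tc := aWindow g m n r c
      g.set r ((g.getD r []).set c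
        (PySem.Int.bor ((g.getD r []).getD c 0) (PySem.Int.floordiv tc.1 tc.2 <<< (8:Nat))))) g) img
  (List.range m).foldl (fun g (r : Nat) =>
    (List.range n).foldl (fun g (c : Nat) =>
      g.set r ((g.getD r []).set c (((g.getD r []).getD c 0) >>> (8:Nat)))) g) g1

-- ===== PORT B =====
-- the per-row prefix-sum array 'colsum' of Source B over the clamped row band's column sums;
-- list indexing is in range under Pre_, so getD/set are exact there
def bColsum (g : List (List Int)) (lo hi : Int) (n : Nat) : List Int :=
  (List.range n).foldl (fun cs (c : Nat) =>
    cs.set (c+1) (cs.getD c 0 +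
      (PySem.List.pyRange lo (hi+1) 1).foldl
        (fun s i => s + PySem.Int.band ((g.getD i.toNat []).getD c 0) 255) 0))
    (List.replicate (n+1) 0)

def imageSmootherAlt_alt (img : List (List Int)) : List (List Int) :=
  let m := img.length
  let n := (img.headD []).length
  let g1 := (List.range m).foldl (fun g (r : Nat) =>
    let lo : Int := max 0 ((r:Int) - 1)
    let hi : Int := min ((m:Int) - 1) ((r:Int) + 1)
    let cs := bColsum g lo hi n
    (List.range n).foldl (fun g (c : Nat) =>
      let c1 : Int := max 0 ((c:Int) - 1)
      let c2 : Int := min ((n:Int) - 1) ((c:Int) + 1)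
      let total := cs.getD (c2+1).toNat 0 - cs.getD c1.toNat 0
      let count := (hi - lo + 1) * (c2 - c1 + 1)
      g.set r ((g.getD r []).set c
        (PySem.Int.bor ((g.getD r []).getD c 0) (PySem.Int.floordiv total count <<< (8:Nat))))) g) img
  (List.range m).foldl (fun g (r : Nat) =>
    (List.range n).foldl (fun g (c : Nat) =>
      g.set r ((g.getD r []).set c (((g.getD r []).getD c 0) >>> (8:Nat)))) g) g1

-- ===== PRECONDITION & SPEC =====
-- Pre_ excludes exactly the inputs where the Python A raises IndexError: the empty grid, and grids
-- in which some row is shorter than the first row (A indexes every row up to the first row's width).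
def Pre_imageSmootherAlt (img : List (List Int)) : Prop :=
  img ≠ [] ∧ ∀ row ∈ img, (img.headD []).length ≤ row.length
instance (img : List (List Int)) : Decidable (Pre_imageSmootherAlt img) := by
  unfold Pre_imageSmootherAlt; infer_instance
def pvWitness_imageSmootherAlt : List (List Int) := [[7, 300], [-2, 5]]
def Spec_imageSmootherAlt (img : List (List Int)) (out : List (List Int)) : Prop :=
  out = imageSmootherAlt_alt img
instance (img : List (List Int)) (out : List (List Int)) : Decidable (Spec_imageSmootherAlt img out) := by
  unfold Spec_imageSmootherAlt; infer_instance

-- ===== CLAIM (what is proved, stated in full; the proofs are below) =====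
def Claim_equal_imageSmootherAlt : Prop := ∀ (img : List (List Int)), Dom_imageSmootherAlt img → Pre_imageSmootherAlt img → Spec_imageSmootherAlt img (imageSmootherAlt img)

-- ===== LEMMAS AND PROOFS =====

theorem testBit255 (i : Nat) : Nat.testBit 255 i = decide (i < 8) := by
  have := Nat.testBit_two_pow_sub_one 8 i
  norm_num at this
  exact this

theorem natAndShift (a u : Nat) : a &&& (u <<< 8) = ((a >>> 8) &&& u) <<< 8 := by
  apply Nat.eq_of_testBit_eq
  intro i
  simp [Nat.testBit_and, Nat.testBit_shiftLeft, Nat.testBit_shiftRight]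
  by_cases h : 8 ≤ i
  · simp [h, Nat.add_sub_cancel' h]
  · simp [h]

theorem natOrShiftLow (a u : Nat) : (a ||| (u <<< 8)) &&& 255 = a &&& 255 := by
  apply Nat.eq_of_testBit_eq
  intro i
  simp [Nat.testBit_and, Nat.testBit_or, Nat.testBit_shiftLeft, testBit255]
  by_cases h : i < 8
  · simp [h, show ¬ (8 ≤ i) by omega]
  · simp [h]

theorem shiftRight8_eq (a : Nat) : a >>> 8 = a / 256 := by
  rw [Nat.shiftRight_eq_div_pow]

theorem natSubDecomp (a u : Nat) :
    a - (a &&& (u <<< 8)) = 256 * (a / 256 - ((a / 256) &&& u)) + a % 256 := by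
  have h1 : a &&& (u <<< 8) = ((a / 256) &&& u) * 256 := by
    rw [natAndShift, Nat.shiftLeft_eq, shiftRight8_eq]
  have h3 : (a / 256) &&& u ≤ a / 256 := Nat.and_le_left
  omega

theorem natSubLow (a u : Nat) :
    (a - (a &&& (u <<< 8))) &&& 255 = a &&& 255 := by
  have h255 : ∀ x : Nat, x &&& 255 = x % 256 := by
    intro x
    have := Nat.and_two_pow_sub_one_eq_mod x 8
    norm_num at this
    exact this
  rw [natSubDecomp, h255, h255]
  omega

theorem castShift (u : Nat) : ((u:Int) <<< (8:Nat)) = ((u <<< 8 : Nat) : Int) := by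
  simp [Int.shiftLeft_eq, Nat.shiftLeft_eq]

theorem borNegSucc (a b : Nat) : PySem.Int.bor (Int.negSucc a) ((b:Nat):Int) = Int.negSucc (a - (a &&& b)) := by
  have key : (-(Int.negSucc a) - 1) = (a : Int) := by rw [Int.negSucc_eq]; ring
  simp only [PySem.Int.bor]
  rw [if_neg (by omega), if_pos (by positivity), key]
  simp [Int.negSucc_eq]
  ring

theorem bandNegSucc (a b : Nat) : PySem.Int.band (Int.negSucc a) ((b:Nat):Int) = ((b - (b &&& a) : Nat) : Int) := by
  have key : (-(Int.negSucc a) - 1) = (a : Int) := by rw [Int.negSucc_eq]; ring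
  simp only [PySem.Int.band]
  rw [if_neg (by omega), if_pos (by positivity), key]
  simp

theorem intPackLow (x : Int) (u : Nat) :
    PySem.Int.band (PySem.Int.bor x ((u:Int) <<< (8:Nat))) 255 = PySem.Int.band x 255 := by
  rw [castShift]
  have h255 : (255 : Int) = ((255:Nat):Int) := rfl
  cases x with
  | ofNat a =>
    show PySem.Int.band (PySem.Int.bor ((a:Nat):Int) _) _ = PySem.Int.band ((a:Nat):Int) _
    rw [PySem.Int.bor_natCast, h255, PySem.Int.band_natCast, PySem.Int.band_natCast, natOrShiftLow]
  | negSucc a =>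
    rw [borNegSucc, h255, bandNegSucc, bandNegSucc]
    rw [Nat.and_comm 255 (a - (a &&& u <<< 8)), natSubLow, Nat.and_comm]

def cellAt (g : List (List Int)) (r c : Nat) : Int := (g.getD r []).getD c 0
def lowAt (g : List (List Int)) (r c : Nat) : Int := PySem.Int.band (cellAt g r c) 255
def pf (g : List (List Int)) (i j : Nat) : Int :=
  ∑ a ∈ Finset.range i, ∑ b ∈ Finset.range j, lowAt g a b
def rlo (r : Nat) : Nat := r - 1
def rhi (m r : Nat) : Nat := min (m - 1) (r + 1) + 1
def boxSum (g : List (List Int)) (m n r c : Nat) : Int :=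
  pf g (rhi m r) (rhi n c) - pf g (rlo r) (rhi n c) - pf g (rhi m r) (rlo c) + pf g (rlo r) (rlo c)
def cntW (m n r c : Nat) : Int := (((rhi m r - rlo r) * (rhi n c - rlo c) : Nat) : Int)
def tval (g : List (List Int)) (m n r c : Nat) : Int :=
  PySem.Int.floordiv (boxSum g m n r c) (cntW m n r c)
def packCell (g : List (List Int)) (m n r c : Nat) : Int :=
  PySem.Int.bor (cellAt g r c) (tval g m n r c <<< (8:Nat))

def mixRowF (f : Nat → Int) (j : Nat) (row : List Int) : List Int :=
  (List.range j).map f ++ row.drop j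
def mixG (g : List (List Int)) (f : Nat → Nat → Int) (n k j : Nat) : List (List Int) :=
  g.mapIdx (fun r row => if r < k then mixRowF (f r) n row else if r = k then mixRowF (f r) j row else row)

theorem getD_mixRowF_lt (f : Nat → Int) (j c : Nat) (row : List Int) (hc : c < j) (hj : j ≤ row.length) :
    (mixRowF f j row).getD c 0 = f c := by
  unfold mixRowF
  rw [List.getD_eq_getElem?_getD, List.getElem?_append_left (by simp; omega)]
  simp [hc]

theorem getD_mixRowF_ge (f : Nat → Int) (j c : Nat) (row : List Int) (hc : j ≤ c) :
    (mixRowF f j row).getD c 0 = row.getD c 0 := by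
  unfold mixRowF
  rcases Nat.lt_or_ge c row.length with h | h
  · rw [List.getD_eq_getElem?_getD, List.getElem?_append_right (by simp; omega)]
    simp [List.getElem?_drop]
    rw [show j + (c - j) = c from by omega]
  · rw [List.getD_eq_getElem?_getD, List.getD_eq_getElem?_getD]
    rw [List.getElem?_eq_none (by simp; omega), List.getElem?_eq_none (by omega)]

theorem set_mixRowF (f : Nat → Int) (j : Nat) (row : List Int) (hj : j < row.length) :
    (mixRowF f j row).set j (f j) = mixRowF f (j+1) row := by
  unfold mixRowF
  apply List.ext_getElem
  · simp; omega
  · intro i h1 h2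
    rw [List.getElem_set]
    by_cases hij : j = i
    · subst hij
      rw [List.getElem_append_right (by simp), if_pos rfl]
      simp
    · rw [if_neg hij]
      by_cases hlt : i < j
      · rw [List.getElem_append_left (by simpa), List.getElem_append_left (by simp; omega)]
        simp
      · rw [List.getElem_append_right (by simp; omega), List.getElem_append_right (by simp; omega)]
        simp only [List.length_map, List.length_range, List.getElem_drop]
        congr 1
        omega

theorem length_mixG (g : List (List Int)) (f : Nat → Nat → Int) (n k j : Nat) :
    (mixG g f n k j).length = g.length := by simp [mixG]

theorem getElem_mixG (g : List (List Int)) (f : Nat → Nat → Int) (n k j r : Nat) (hr : r < g.length)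
    (h2 : r < (mixG g f n k j).length) :
    (mixG g f n k j)[r] = if r < k then mixRowF (f r) n g[r] else if r = k then mixRowF (f r) j g[r] else g[r] := by
  simp [mixG]

theorem mixG_zero (g : List (List Int)) (f : Nat → Nat → Int) (n : Nat) :
    mixG g f n 0 0 = g := by
  apply List.ext_getElem (by simp [length_mixG])
  intro i h1 h2
  rw [getElem_mixG g f n 0 0 i h2]
  simp [mixRowF]

theorem mixG_roll (g : List (List Int)) (f : Nat → Nat → Int) (n k : Nat) :
    mixG g f n k n = mixG g f n (k+1) 0 := by
  apply List.ext_getElem (by simp [length_mixG])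
  intro i h1 h2
  rw [length_mixG] at h1
  rw [getElem_mixG g f n k n i h1 (by rwa [length_mixG]), getElem_mixG g f n (k+1) 0 i h1 (by rwa [length_mixG])]
  by_cases h : i < k
  · simp [h, Nat.lt_succ_of_lt h]
  · by_cases h' : i = k
    · simp [h, h', mixRowF]
    · simp [h, h', show ¬ i < k + 1 from by omega, mixRowF]

theorem getD_mixG (g : List (List Int)) (f : Nat → Nat → Int) (n k j r : Nat) (hr : r < g.length) :
    (mixG g f n k j).getD r [] = if r < k then mixRowF (f r) n g[r] else if r = k then mixRowF (f r) j g[r] else g[r] := by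
  rw [List.getD_eq_getElem?_getD, List.getElem?_eq_getElem (by rwa [length_mixG])]
  simp only [Option.getD_some]
  exact getElem_mixG g f n k j r hr _

theorem set_mixG (g : List (List Int)) (f : Nat → Nat → Int) (n k j : Nat) (hk : k < g.length) (hj : j < n)
    (hrow : ∀ row ∈ g, n ≤ row.length) :
    (mixG g f n k j).set k ((mixRowF (f k) j g[k]).set j (f k j)) = mixG g f n k (j+1) := by
  have hlen : n ≤ g[k].length := hrow _ (List.getElem_mem hk)
  apply List.ext_getElem (by simp [length_mixG])
  intro i h1 h2
  rw [List.getElem_set]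
  rw [length_mixG] at h2
  rw [getElem_mixG g f n k (j+1) i h2 (by rwa [length_mixG])]
  by_cases h : i = k
  · subst h
    rw [if_pos rfl, if_neg (by omega), if_pos rfl]
    exact set_mixRowF (f i) j g[i] (by omega)
  · rw [if_neg (show ¬ k = i from fun hh => h hh.symm), getElem_mixG g f n k j i h2 (by rwa [length_mixG])]
    simp [h]

theorem foldl_grid_inner (g : List (List Int)) (n : Nat) (F : List (List Int) → Nat → Nat → Int)
    (f : Nat → Nat → Int) (k : Nat) (hk : k < g.length)
    (hrow : ∀ row ∈ g, n ≤ row.length)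
    (hF : ∀ j, j < n → F (mixG g f n k j) k j = f k j) :
    ∀ j, j ≤ n → (List.range j).foldl (fun h c => h.set k ((h.getD k []).set c (F h k c))) (mixG g f n k 0)
      = mixG g f n k j := by
  intro j
  induction j with
  | zero => intro _; simp
  | succ j ih =>
    intro hj
    rw [List.range_succ, List.foldl_append, ih (by omega)]
    simp only [List.foldl_cons, List.foldl_nil]
    rw [getD_mixG g f n k j k hk, if_neg (by omega), if_pos rfl]
    rw [hF j (by omega)]
    exact set_mixG g f n k j hk (by omega) hrow

theorem foldl_grid (g : List (List Int)) (n : Nat) (F : List (List Int) → Nat → Nat → Int)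
    (f : Nat → Nat → Int)
    (hrow : ∀ row ∈ g, n ≤ row.length)
    (hF : ∀ k j, k < g.length → j < n → F (mixG g f n k j) k j = f k j) :
    (List.range g.length).foldl (fun h r => (List.range n).foldl
        (fun h c => h.set r ((h.getD r []).set c (F h r c))) h) g
      = mixG g f n g.length 0 := by
  suffices H : ∀ k, k ≤ g.length → (List.range k).foldl (fun h r => (List.range n).foldl
      (fun h c => h.set r ((h.getD r []).set c (F h r c))) h) g = mixG g f n k 0 by
    exact H g.length le_rfl
  intro k
  induction k with
  | zero => intro _; simp [mixG_zero]
  | succ k ih =>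
    intro hk
    rw [List.range_succ, List.foldl_append, ih (by omega)]
    simp only [List.foldl_cons, List.foldl_nil]
    rw [foldl_grid_inner g n F f k (by omega) hrow (fun j hj => hF k j (by omega) hj) n le_rfl]
    exact mixG_roll g f n k

theorem lowAt_nonneg (g : List (List Int)) (r c : Nat) : 0 ≤ lowAt g r c := by
  rw [lowAt, PySem.Int.band_comm]
  exact PySem.Int.band_nonneg_of_nonneg_left _ (by norm_num)

theorem pyRangeThree (a : Int) : PySem.List.pyRange (a-1) (a+2) 1 = [a-1, a, a+1] := by
  rw [PySem.List.pyRange_one_cons (by omega), show a - 1 + 1 = a from by ring,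
      PySem.List.pyRange_one_cons (by omega),
      PySem.List.pyRange_one_cons (by omega), show a + 1 + 1 = a + 2 from by ring,
      PySem.List.pyRange_one_eq_nil (by omega)]

theorem boxSum_rect (g : List (List Int)) (m n r c : Nat) (hr : r < m) (hc : c < n) :
    boxSum g m n r c
      = ∑ i ∈ Finset.Ico (rlo r) (rhi m r), ∑ j ∈ Finset.Ico (rlo c) (rhi n c), lowAt g i j := by
  have hrb : rlo r ≤ rhi m r := by unfold rlo rhi; omega
  have hcb : rlo c ≤ rhi n c := by unfold rlo rhi; omega
  have inner : ∀ i, (∑ j ∈ Finset.Ico (rlo c) (rhi n c), lowAt g i j)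
      = (∑ j ∈ Finset.range (rhi n c), lowAt g i j) - (∑ j ∈ Finset.range (rlo c), lowAt g i j) :=
    fun i => Finset.sum_Ico_eq_sub _ hcb
  symm
  calc ∑ i ∈ Finset.Ico (rlo r) (rhi m r), ∑ j ∈ Finset.Ico (rlo c) (rhi n c), lowAt g i j
      = ∑ i ∈ Finset.Ico (rlo r) (rhi m r),
          ((∑ j ∈ Finset.range (rhi n c), lowAt g i j) - (∑ j ∈ Finset.range (rlo c), lowAt g i j)) := by
        exact Finset.sum_congr rfl (fun i _ => inner i)
    _ = (∑ i ∈ Finset.Ico (rlo r) (rhi m r), ∑ j ∈ Finset.range (rhi n c), lowAt g i j)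
        - ∑ i ∈ Finset.Ico (rlo r) (rhi m r), ∑ j ∈ Finset.range (rlo c), lowAt g i j := by
        rw [Finset.sum_sub_distrib]
    _ = boxSum g m n r c := by
        rw [Finset.sum_Ico_eq_sub _ hrb, Finset.sum_Ico_eq_sub _ hrb]
        unfold boxSum pf
        ring

theorem window_split (m r : Nat) (hr : r < m) (F : Nat → Int) :
    ∑ i ∈ Finset.Ico (rlo r) (rhi m r), F i
      = (if 1 ≤ r then F (r-1) else 0) + F r + (if r+1 < m then F (r+1) else 0) := by
  rcases Nat.lt_or_ge r 1 with h1 | h1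
  · have hr0 : r = 0 := by omega
    subst hr0
    rcases Nat.lt_or_ge m 2 with h2 | h2
    · rw [show rlo 0 = 0 from rfl, show rhi m 0 = 1 from by unfold rhi; omega]
      rw [Finset.sum_Ico_succ_top (by omega), Finset.Ico_self]
      simp [show ¬ (0 + 1 < m) from by omega]
    · rw [show rlo 0 = 0 from rfl, show rhi m 0 = 2 from by unfold rhi; omega]
      rw [Finset.sum_Ico_succ_top (by omega), Finset.sum_Ico_succ_top (by omega), Finset.Ico_self]
      simp [show 0 + 1 < m from by omega]
  · rcases Nat.lt_or_ge (r+1) m with h2 | h2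
    · rw [show rlo r = r - 1 from rfl, show rhi m r = r + 2 from by unfold rhi; omega]
      rw [Finset.sum_Ico_succ_top (by omega), Finset.sum_Ico_succ_top (by omega),
          show Finset.Ico (r-1) r = Finset.Ico (r-1) ((r-1)+1) from by congr 1; omega,
          Finset.sum_Ico_succ_top (by omega), Finset.Ico_self]
      simp [h1, h2]
    · rw [show rlo r = r - 1 from rfl, show rhi m r = r + 1 from by unfold rhi; omega]
      rw [Finset.sum_Ico_succ_top (by omega),
          show Finset.Ico (r-1) r = Finset.Ico (r-1) ((r-1)+1) from by congr 1; omega,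
          Finset.sum_Ico_succ_top (by omega), Finset.Ico_self]
      simp [h1, show ¬ (r+1 < m) from by omega]

theorem boxSum_window (g : List (List Int)) (m n r c : Nat) (hr : r < m) (hc : c < n) :
    boxSum g m n r c =
      (if 1 ≤ r then ((if 1 ≤ c then lowAt g (r-1) (c-1) else 0) + lowAt g (r-1) c
          + (if c+1 < n then lowAt g (r-1) (c+1) else 0)) else 0)
      + ((if 1 ≤ c then lowAt g r (c-1) else 0) + lowAt g r c
          + (if c+1 < n then lowAt g r (c+1) else 0))
      + (if r+1 < m then ((if 1 ≤ c then lowAt g (r+1) (c-1) else 0) + lowAt g (r+1) c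
          + (if c+1 < n then lowAt g (r+1) (c+1) else 0)) else 0) := by
  rw [boxSum_rect g m n r c hr hc, window_split m r hr]
  have hin : ∀ i, (∑ j ∈ Finset.Ico (rlo c) (rhi n c), lowAt g i j)
      = (if 1 ≤ c then lowAt g i (c-1) else 0) + lowAt g i c + (if c+1 < n then lowAt g i (c+1) else 0) :=
    fun i => window_split n c hc _
  rw [hin, hin, hin]

theorem span_eq (m r : Nat) (hr : r < m) :
    ((min (m-1) (r+1) + 1 - (r-1) : Nat) : Int)
      = (if 1 ≤ r then (1:Int) else 0) + 1 + (if r+1 < m then 1 else 0) := by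
  split_ifs <;> omega

theorem cntW_window (m n r c : Nat) (hr : r < m) (hc : c < n) :
    cntW m n r c =
      (if 1 ≤ r then ((if 1 ≤ c then (1:Int) else 0) + 1 + (if c+1 < n then 1 else 0)) else 0)
      + ((if 1 ≤ c then (1:Int) else 0) + 1 + (if c+1 < n then 1 else 0))
      + (if r+1 < m then ((if 1 ≤ c then (1:Int) else 0) + 1 + (if c+1 < n then 1 else 0)) else 0) := by
  unfold cntW rhi rlo
  push_cast [Nat.cast_mul]
  rw [show ((min (m-1) (r+1) + 1 - (r-1) : Nat) : Int) * ((min (n-1) (c+1) + 1 - (c-1) : Nat) : Int)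
      = (((if 1 ≤ r then (1:Int) else 0) + 1 + (if r+1 < m then 1 else 0))
        * ((if 1 ≤ c then (1:Int) else 0) + 1 + (if c+1 < n then 1 else 0))) from by
    rw [span_eq m r hr, span_eq n c hc]]
  split_ifs <;> ring

theorem condStep (P : Prop) [Decidable P] (tc : Int × Int) (x : Int) :
    (if P then (tc.1 + x, tc.2 + 1) else tc) = (tc.1 + if P then x else 0, tc.2 + if P then 1 else 0) := by
  split_ifs <;> simp

theorem aWindow_eq (g h : List (List Int)) (m n r c : Nat) (hr : r < m) (hc : c < n)
    (hlow : ∀ i j, lowAt h i j = lowAt g i j) :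
    aWindow h m n r c = (boxSum g m n r c, cntW m n r c) := by
  have L : ∀ a b : Nat, PySem.Int.band ((h.getD a []).getD b 0) 255 = lowAt g a b :=
    fun a b => hlow a b ▸ rfl
  have t1 : ((r:Int) - 1).toNat = r - 1 := by omega
  have t2 : ((r:Int) + 1).toNat = r + 1 := by omega
  have t3 : ((r:Int)).toNat = r := by omega
  have s1 : ((c:Int) - 1).toNat = c - 1 := by omega
  have s2 : ((c:Int) + 1).toNat = c + 1 := by omega
  have s3 : ((c:Int)).toNat = c := by omega
  have e1 : ((0:Int) ≤ (r:Int) - 1) = (1 ≤ r) := by rw [eq_iff_iff]; omega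
  have e2 : ((r:Int) - 1 < (m:Int)) = True := by rw [eq_iff_iff, iff_true]; omega
  have e3 : ((0:Int) ≤ (r:Int)) = True := by rw [eq_iff_iff, iff_true]; omega
  have e4 : ((r:Int) < (m:Int)) = True := by rw [eq_iff_iff, iff_true]; omega
  have e5 : ((0:Int) ≤ (r:Int) + 1) = True := by rw [eq_iff_iff, iff_true]; omega
  have e6 : ((r:Int) + 1 < (m:Int)) = (r + 1 < m) := by rw [eq_iff_iff]; omega
  have f1 : ((0:Int) ≤ (c:Int) - 1) = (1 ≤ c) := by rw [eq_iff_iff]; omega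
  have f2 : ((c:Int) - 1 < (n:Int)) = True := by rw [eq_iff_iff, iff_true]; omega
  have f3 : ((0:Int) ≤ (c:Int)) = True := by rw [eq_iff_iff, iff_true]; omega
  have f4 : ((c:Int) < (n:Int)) = True := by rw [eq_iff_iff, iff_true]; omega
  have f5 : ((0:Int) ≤ (c:Int) + 1) = True := by rw [eq_iff_iff, iff_true]; omega
  have f6 : ((c:Int) + 1 < (n:Int)) = (c + 1 < n) := by rw [eq_iff_iff]; omega
  unfold aWindow
  rw [pyRangeThree, pyRangeThree]
  simp only [List.foldl_cons, List.foldl_nil, condStep, e1, e2, e3, e4, e5, e6, f1, f2, f3, f4, f5, f6,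
    true_and, and_true, t1, t2, t3, s1, s2, s3, L]
  rw [boxSum_window g m n r c hr hc, cntW_window m n r c hr hc]
  by_cases h1 : 1 ≤ r <;> by_cases h2 : r + 1 < m <;> by_cases h3 : 1 ≤ c <;> by_cases h4 : c + 1 < n <;>
    simp [h1, h2, h3, h4] <;> ring

theorem cntW_pos (m n r c : Nat) (hr : r < m) (hc : c < n) : 0 < cntW m n r c := by
  unfold cntW rhi rlo
  have h1 : 1 ≤ min (m-1) (r+1) + 1 - (r-1) := by omega
  have h2 : 1 ≤ min (n-1) (c+1) + 1 - (c-1) := by omega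
  exact_mod_cast Nat.mul_pos (by omega) (by omega)

theorem boxSum_nonneg (g : List (List Int)) (m n r c : Nat) (hr : r < m) (hc : c < n) :
    0 ≤ boxSum g m n r c := by
  rw [boxSum_rect g m n r c hr hc]
  exact Finset.sum_nonneg fun i _ => Finset.sum_nonneg fun j _ => lowAt_nonneg g i j

theorem tval_nonneg (g : List (List Int)) (m n r c : Nat) (hr : r < m) (hc : c < n) :
    0 ≤ tval g m n r c := by
  rw [tval, PySem.Int.floordiv_eq_ediv_of_pos (cntW_pos m n r c hr hc)]
  exact Int.ediv_nonneg (boxSum_nonneg g m n r c hr hc) (le_of_lt (cntW_pos m n r c hr hc))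

theorem band_packCell (g : List (List Int)) (m n r c : Nat) (hr : r < m) (hc : c < n) :
    PySem.Int.band (packCell g m n r c) 255 = PySem.Int.band (cellAt g r c) 255 := by
  unfold packCell
  rw [show tval g m n r c = ((tval g m n r c).toNat : Int) from
    (Int.toNat_of_nonneg (tval_nonneg g m n r c hr hc)).symm]
  exact intPackLow _ _

theorem getD_nil_nil (g : List (List Int)) (i : Nat) (h : g.length ≤ i) : g.getD i [] = [] := by
  rw [List.getD_eq_getElem?_getD, List.getElem?_eq_none (by omega)]; rfl

theorem getD_eq_getElem' (g : List (List Int)) (i : Nat) (h : i < g.length) : g.getD i [] = g[i] := by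
  rw [List.getD_eq_getElem?_getD, List.getElem?_eq_getElem h]; rfl

theorem lowAt_mixG_pack (g : List (List Int)) (n k j : Nat) (hj : j ≤ n)
    (hrow : ∀ row ∈ g, n ≤ row.length) (i b : Nat) :
    lowAt (mixG g (packCell g g.length n) n k j) i b = lowAt g i b := by
  rcases Nat.lt_or_ge i g.length with hi | hi
  · unfold lowAt cellAt
    rw [getD_mixG g _ n k j i hi, getD_eq_getElem' g i hi]
    have hlen : n ≤ g[i].length := hrow _ (List.getElem_mem hi)
    have hcell : ∀ j', j' ≤ n → PySem.Int.band ((mixRowF (packCell g g.length n i) j' g[i]).getD b 0) 255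
        = PySem.Int.band (g[i].getD b 0) 255 := by
      intro j' hj'
      rcases Nat.lt_or_ge b j' with hb | hb
      · rw [getD_mixRowF_lt _ _ _ _ hb (by omega)]
        have := band_packCell g g.length n i b hi (by omega)
        rw [this]
        unfold cellAt
        rw [getD_eq_getElem' g i hi]
      · rw [getD_mixRowF_ge _ _ _ _ hb]
    split_ifs with h1 h2
    · exact hcell n le_rfl
    · exact hcell j hj
    · rfl
  · unfold lowAt cellAt
    rw [getD_nil_nil _ i (by rw [length_mixG]; omega), getD_nil_nil g i hi]

theorem cellAt_mixG_cur (g : List (List Int)) (f : Nat → Nat → Int) (n k j : Nat) (hk : k < g.length) :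
    cellAt (mixG g f n k j) k j = cellAt g k j := by
  unfold cellAt
  rw [getD_mixG g f n k j k hk, if_neg (by omega), if_pos rfl,
      getD_mixRowF_ge _ _ _ _ le_rfl, getD_eq_getElem' g k hk]

theorem phase1_eq (g : List (List Int)) (n : Nat) (hrow : ∀ row ∈ g, n ≤ row.length) :
    (List.range g.length).foldl (fun h (r : Nat) =>
      (List.range n).foldl (fun h (c : Nat) =>
        let tc := aWindow h g.length n r c
        h.set r ((h.getD r []).set c
          (PySem.Int.bor ((h.getD r []).getD c 0) (PySem.Int.floordiv tc.1 tc.2 <<< (8:Nat))))) h) g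
      = mixG g (packCell g g.length n) n g.length 0 := by
  exact foldl_grid g n
    (fun h r c => PySem.Int.bor ((h.getD r []).getD c 0)
      (PySem.Int.floordiv (aWindow h g.length n r c).1 (aWindow h g.length n r c).2 <<< (8:Nat)))
    (packCell g g.length n) hrow
    (fun k j hk hj => by
      simp only []
      rw [aWindow_eq g _ g.length n k j hk hj (lowAt_mixG_pack g n k j (le_of_lt hj) hrow)]
      have := cellAt_mixG_cur g (packCell g g.length n) n k j hk
      unfold cellAt at this
      rw [this]
      rfl)

-- ===== B-side lemmas: the colsum prefix array computes the same window totals =====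

def colF (g : List (List Int)) (m r j : Nat) : Int :=
  ∑ i ∈ Finset.Ico (rlo r) (rhi m r), ∑ b ∈ Finset.range j, lowAt g i b

theorem foldl_pyRange_sum (f : Nat → Int) :
    ∀ (d : Nat) (a b : Int), 0 ≤ a → (b - a).toNat = d → ∀ s : Int,
      (PySem.List.pyRange a b 1).foldl (fun acc i => acc + f i.toNat) s
        = s + ∑ i ∈ Finset.Ico a.toNat b.toNat, f i := by
  intro d
  induction d with
  | zero =>
    intro a b ha hd s
    rw [PySem.List.pyRange_one_eq_nil (by omega)]
    rw [show Finset.Ico a.toNat b.toNat = ∅ from Finset.Ico_eq_empty (by omega)]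
    simp
  | succ d ih =>
    intro a b ha hd s
    rw [PySem.List.pyRange_one_cons (by omega)]
    simp only [List.foldl_cons]
    rw [ih (a+1) b (by omega) (by omega) (s + f a.toNat)]
    rw [show (a+1).toNat = a.toNat + 1 from by omega]
    rw [Finset.sum_Ico_eq_sum_range, Finset.sum_Ico_eq_sum_range]
    rw [show b.toNat - a.toNat = (b.toNat - (a.toNat + 1)) + 1 from by omega]
    rw [Finset.sum_range_succ']
    have : ∀ x ∈ Finset.range (b.toNat - (a.toNat + 1)), f (a.toNat + 1 + x) = f (a.toNat + (x + 1)) := by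
      intro x _; congr 1; omega
    rw [Finset.sum_congr rfl this]
    ring

theorem getD_build (L : Nat → Int) (k n j : Nat) (hj : j ≤ k) (hk : k ≤ n) :
    (((List.range (k+1)).map L) ++ List.replicate (n-k) 0).getD j 0 = L j := by
  rw [List.getD_eq_getElem?_getD, List.getElem?_append_left (by simp; omega)]
  rw [List.getElem?_map, List.getElem?_range (by omega)]
  simp

theorem set_build (L : Nat → Int) (k n : Nat) (hk : k < n) :
    ((((List.range (k+1)).map L) ++ List.replicate (n-k) 0).set (k+1) (L (k+1)))
      = (((List.range (k+2)).map L) ++ List.replicate (n-(k+1)) 0) := by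
  apply List.ext_getElem
  · simp; omega
  · intro i h1 h2
    simp only [List.length_set, List.length_append, List.length_map, List.length_range,
      List.length_replicate] at h1 h2
    rw [List.getElem_set]
    by_cases hik : i = k + 1
    · subst hik
      rw [if_pos rfl, List.getElem_append_left (by simp)]
      simp
    · rw [if_neg (fun hh => hik hh.symm)]
      by_cases hlt : i < k + 1
      · rw [List.getElem_append_left (by simp; omega), List.getElem_append_left (by simp; omega)]
        simp [hlt, show i < k + 2 from by omega]
      · rw [List.getElem_append_right (by simp; omega), List.getElem_append_right (by simp; omega)]
        simp

theorem bColsum_spec (g : List (List Int)) (n r : Nat) (hr : r < g.length) :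
    bColsum g (max 0 ((r:Int) - 1)) (min ((g.length:Int) - 1) ((r:Int) + 1)) n
      = ((List.range (n+1)).map (colF g g.length r)) ++ List.replicate (n-n) 0 := by
  have ha : (max 0 ((r:Int) - 1)).toNat = rlo r := by unfold rlo; omega
  have hb : (min ((g.length:Int) - 1) ((r:Int) + 1) + 1).toNat = rhi g.length r := by
    unfold rhi; omega
  have ha0 : (0:Int) ≤ max 0 ((r:Int) - 1) := by omega
  have hS : ∀ c : Nat,
      (PySem.List.pyRange (max 0 ((r:Int) - 1)) (min ((g.length:Int) - 1) ((r:Int) + 1) + 1) 1).foldl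
        (fun s i => s + PySem.Int.band ((g.getD i.toNat []).getD c 0) 255) 0
        = ∑ i ∈ Finset.Ico (rlo r) (rhi g.length r), lowAt g i c := by
    intro c
    have := foldl_pyRange_sum (fun i => lowAt g i c)
      ((min ((g.length:Int) - 1) ((r:Int) + 1) + 1) - max 0 ((r:Int) - 1)).toNat
      (max 0 ((r:Int) - 1)) (min ((g.length:Int) - 1) ((r:Int) + 1) + 1) ha0 rfl 0
    rw [ha, hb] at this
    rw [show (fun (s : Int) (i : Int) => s + PySem.Int.band ((g.getD i.toNat []).getD c 0) 255)
        = (fun (acc : Int) (i : Int) => acc + (fun j => lowAt g j c) i.toNat) from rfl]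
    rw [this]
    ring
  unfold bColsum
  suffices H : ∀ k, k ≤ n →
      (List.range k).foldl (fun cs (c : Nat) =>
        cs.set (c+1) (cs.getD c 0 +
          (PySem.List.pyRange (max 0 ((r:Int) - 1)) (min ((g.length:Int) - 1) ((r:Int) + 1) + 1) 1).foldl
            (fun s i => s + PySem.Int.band ((g.getD i.toNat []).getD c 0) 255) 0))
        (List.replicate (n+1) 0)
      = ((List.range (k+1)).map (colF g g.length r)) ++ List.replicate (n-k) 0 by
    exact H n le_rfl
  intro k
  induction k with
  | zero =>
    intro _
    simp only [List.range_zero, List.foldl_nil]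
    apply List.ext_getElem
    · simp
    · intro i h1 h2
      simp only [List.length_replicate] at h1
      rw [List.getElem_replicate]
      by_cases hi : i = 0
      · subst hi
        rw [List.getElem_append_left (by simp)]
        simp [colF]
      · rw [List.getElem_append_right (by simp; omega)]
        simp
  | succ k ih =>
    intro hk
    rw [List.range_succ, List.foldl_append, ih (by omega)]
    simp only [List.foldl_cons, List.foldl_nil]
    rw [getD_build _ k n k le_rfl (by omega), hS k]
    rw [show colF g g.length r k + ∑ i ∈ Finset.Ico (rlo r) (rhi g.length r), lowAt g i k
        = colF g g.length r (k+1) from by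
      unfold colF
      rw [← Finset.sum_add_distrib]
      exact Finset.sum_congr rfl (fun i _ => (Finset.sum_range_succ _ _).symm)]
    exact set_build (colF g g.length r) k n (by omega)

theorem bVal_eq (g : List (List Int)) (n r c : Nat) (hr : r < g.length) (hc : c < n) :
    PySem.Int.floordiv
      ((bColsum g (max 0 ((r:Int) - 1)) (min ((g.length:Int) - 1) ((r:Int) + 1)) n).getD
          ((min ((n:Int) - 1) ((c:Int) + 1)) + 1).toNat 0
        - (bColsum g (max 0 ((r:Int) - 1)) (min ((g.length:Int) - 1) ((r:Int) + 1)) n).getD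
          (max 0 ((c:Int) - 1)).toNat 0)
      ((min ((g.length:Int) - 1) ((r:Int) + 1) - max 0 ((r:Int) - 1) + 1)
        * (min ((n:Int) - 1) ((c:Int) + 1) - max 0 ((c:Int) - 1) + 1))
      = tval g g.length n r c := by
  have hc2 : ((min ((n:Int) - 1) ((c:Int) + 1)) + 1).toNat = rhi n c := by unfold rhi; omega
  have hc1 : (max 0 ((c:Int) - 1)).toNat = rlo c := by unfold rlo; omega
  have hcnt : (min ((g.length:Int) - 1) ((r:Int) + 1) - max 0 ((r:Int) - 1) + 1)
      * (min ((n:Int) - 1) ((c:Int) + 1) - max 0 ((c:Int) - 1) + 1) = cntW g.length n r c := by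
    unfold cntW rhi rlo
    rw [Nat.cast_mul]
    have e1 : min ((g.length:Int) - 1) ((r:Int) + 1) - max 0 ((r:Int) - 1) + 1
        = ((min (g.length-1) (r+1) + 1 - (r-1) : Nat) : Int) := by omega
    have e2 : min ((n:Int) - 1) ((c:Int) + 1) - max 0 ((c:Int) - 1) + 1
        = ((min (n-1) (c+1) + 1 - (c-1) : Nat) : Int) := by omega
    rw [e1, e2]
  rw [bColsum_spec g n r hr, hc2, hc1]
  rw [getD_build _ n n (rhi n c) (by unfold rhi; omega) le_rfl,
      getD_build _ n n (rlo c) (by unfold rlo; omega) le_rfl, hcnt]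
  have htot : colF g g.length r (rhi n c) - colF g g.length r (rlo c) = boxSum g g.length n r c := by
    rw [boxSum_rect g g.length n r c hr hc]
    unfold colF
    rw [← Finset.sum_sub_distrib]
    exact Finset.sum_congr rfl (fun i _ =>
      (Finset.sum_Ico_eq_sub _ (by unfold rlo rhi; omega)).symm)
  rw [htot]
  rfl

theorem bphase1_eq (g : List (List Int)) (n : Nat) (hrow : ∀ row ∈ g, n ≤ row.length) :
    (List.range g.length).foldl (fun h (r : Nat) =>
      let lo : Int := max 0 ((r:Int) - 1)
      let hi : Int := min ((g.length:Int) - 1) ((r:Int) + 1)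
      let cs := bColsum h lo hi n
      (List.range n).foldl (fun h (c : Nat) =>
        let c1 : Int := max 0 ((c:Int) - 1)
        let c2 : Int := min ((n:Int) - 1) ((c:Int) + 1)
        let total := cs.getD (c2+1).toNat 0 - cs.getD c1.toNat 0
        let count := (hi - lo + 1) * (c2 - c1 + 1)
        h.set r ((h.getD r []).set c
          (PySem.Int.bor ((h.getD r []).getD c 0)
            (PySem.Int.floordiv total count <<< (8:Nat))))) h) g
      = mixG g (packCell g g.length n) n g.length 0 := by
  have hinv : ∀ k j, j ≤ n → bColsum (mixG g (packCell g g.length n) n k j)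
      (max 0 ((k:Int) - 1)) (min ((g.length:Int) - 1) ((k:Int) + 1)) n
      = bColsum g (max 0 ((k:Int) - 1)) (min ((g.length:Int) - 1) ((k:Int) + 1)) n := by
    intro k j hj
    unfold bColsum
    refine congrArg (fun f => List.foldl f (List.replicate (n+1) 0) (List.range n)) ?_
    funext cs c
    refine congrArg (fun v => cs.set (c+1) (cs.getD c 0 + v)) ?_
    refine congrArg (fun f2 => List.foldl f2 (0:Int)
      (PySem.List.pyRange (max 0 ((k:Int) - 1)) (min ((g.length:Int) - 1) ((k:Int) + 1) + 1) 1)) ?_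
    funext s i
    refine congrArg (fun v => s + v) ?_
    have := lowAt_mixG_pack g n k j hj hrow i.toNat c
    unfold lowAt cellAt at this
    exact this
  suffices H : ∀ k, k ≤ g.length → (List.range k).foldl (fun h (r : Nat) =>
      let lo : Int := max 0 ((r:Int) - 1)
      let hi : Int := min ((g.length:Int) - 1) ((r:Int) + 1)
      let cs := bColsum h lo hi n
      (List.range n).foldl (fun h (c : Nat) =>
        let c1 : Int := max 0 ((c:Int) - 1)
        let c2 : Int := min ((n:Int) - 1) ((c:Int) + 1)
        let total := cs.getD (c2+1).toNat 0 - cs.getD c1.toNat 0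
        let count := (hi - lo + 1) * (c2 - c1 + 1)
        h.set r ((h.getD r []).set c
          (PySem.Int.bor ((h.getD r []).getD c 0)
            (PySem.Int.floordiv total count <<< (8:Nat))))) h) g
      = mixG g (packCell g g.length n) n k 0 by
    exact H g.length le_rfl
  intro k
  induction k with
  | zero => intro _; simp [mixG_zero]
  | succ k ih =>
    intro hk
    rw [List.range_succ, List.foldl_append, ih (by omega)]
    simp only [List.foldl_cons, List.foldl_nil]
    show (List.range n).foldl _ (mixG g (packCell g g.length n) n k 0) = _
    rw [show bColsum (mixG g (packCell g g.length n) n k 0)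
        (max 0 ((k:Int) - 1)) (min ((g.length:Int) - 1) ((k:Int) + 1)) n
        = bColsum g (max 0 ((k:Int) - 1)) (min ((g.length:Int) - 1) ((k:Int) + 1)) n from
      hinv k 0 (by omega)]
    rw [foldl_grid_inner g n
      (fun h r c => PySem.Int.bor ((h.getD r []).getD c 0)
        (PySem.Int.floordiv
          ((bColsum g (max 0 ((r:Int) - 1)) (min ((g.length:Int) - 1) ((r:Int) + 1)) n).getD
              ((min ((n:Int) - 1) ((c:Int) + 1)) + 1).toNat 0
            - (bColsum g (max 0 ((r:Int) - 1)) (min ((g.length:Int) - 1) ((r:Int) + 1)) n).getD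
              (max 0 ((c:Int) - 1)).toNat 0)
          ((min ((g.length:Int) - 1) ((r:Int) + 1) - max 0 ((r:Int) - 1) + 1)
            * (min ((n:Int) - 1) ((c:Int) + 1) - max 0 ((c:Int) - 1) + 1)) <<< (8:Nat)))
      (packCell g g.length n) k (by omega) hrow
      (fun j hj => by
        simp only []
        rw [bVal_eq g n k j (by omega) hj]
        have := cellAt_mixG_cur g (packCell g g.length n) n k j (by omega)
        unfold cellAt at this
        rw [this]
        rfl)
      n le_rfl]
    exact mixG_roll g (packCell g g.length n) n k

-- ===== VERDICT (by name: the statement is the Claim_ definition above) =====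
theorem imageSmootherAlt_spec : Claim_equal_imageSmootherAlt := by
  intro img _hdom hpre
  unfold Spec_imageSmootherAlt
  obtain ⟨hne, hrow⟩ := hpre
  unfold imageSmootherAlt imageSmootherAlt_alt
  simp only []
  rw [phase1_eq img _ hrow, bphase1_eq img _ hrow]
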